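-- pv_equiv track=rewrite | github.com/tgcx12/diyetisyen-chatbot | labels.py | apply_mutex
-- ===== SOURCE A (Python) =====
-- from typing import Any, Dict, List, Tuple, Optional
--
-- def apply_mutex(tags: List[str], group: List[str], risk_order: List[str]) -> List[str]:
--     present = [t for t in tags if t in group]
--     if len(present) <= 1:
--         return tags
--     keep = None
--     for r in risk_order:
--         if r in present:
--             keep = r
--             break
--     if keep is None:
--         keep = present[0]
--     return [t for t in tags if t not in group] + [keep]
-- ===== SOURCE B (Python) =====
-- def apply_mutex(tags, group, risk_order):
--     present = [t for t in tags if t in group]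
--     if len(present) <= 1:
--         return tags
--     keep = min(present, key=lambda t: risk_order.index(t) if t in risk_order else len(risk_order))
--     return [t for t in tags if t not in group] + [keep]
-- ===== Notes on version B (the rewrite author's own statement) =====
-- stated objective: idiomatic
-- what changed: Instead of A's linear scan over risk_order looking for the first member of present, B selects the kept tag with min over present keyed by each tag's position in risk_order (absent tags get the sentinel len(risk_order)), which also subsumes A's keep-is-None fallback to present[0].
import Mathlib
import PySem

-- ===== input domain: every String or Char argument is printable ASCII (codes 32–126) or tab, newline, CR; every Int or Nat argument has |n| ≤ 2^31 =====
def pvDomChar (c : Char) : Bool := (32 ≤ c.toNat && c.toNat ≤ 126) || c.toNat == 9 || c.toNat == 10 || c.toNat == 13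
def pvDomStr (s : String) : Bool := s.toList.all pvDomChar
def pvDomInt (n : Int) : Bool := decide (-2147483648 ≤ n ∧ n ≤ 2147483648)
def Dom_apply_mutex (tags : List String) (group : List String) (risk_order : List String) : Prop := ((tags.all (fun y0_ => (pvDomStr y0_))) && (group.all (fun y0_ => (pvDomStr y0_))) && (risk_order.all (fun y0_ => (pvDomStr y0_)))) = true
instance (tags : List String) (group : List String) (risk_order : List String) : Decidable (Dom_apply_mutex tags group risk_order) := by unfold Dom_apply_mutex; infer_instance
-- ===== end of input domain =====

-- B replaces A's first-match scan over risk_order by a min over the present tags keyed by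
-- position in risk_order (sentinel = len(risk_order) for absent tags); same return value, no speed claim.

-- ===== PORT A =====
-- A: present = tags filtered to group; early return; then scan risk_order for the first
-- member of present (loop with break = find?), falling back to present[0].
def apply_mutex (tags : List String) (group : List String) (risk_order : List String) : List String :=
  let present := tags.filter (fun t => group.contains t)
  if present.length ≤ 1 then tags
  else
    let keep :=
      match risk_order.find? (fun r => present.contains r) with
      | some r => r
      | none => PySem.List.pyGetD present 0 ""   -- present[0]; in range: length ≥ 2 here
    tags.filter (fun t => !group.contains t) ++ [keep]

-- ===== PORT B =====
-- B's key: risk_order.index(t) if t in risk_order else len(risk_order)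
def pvRank (risk_order : List String) (t : String) : Nat :=
  if risk_order.contains t then (PySem.List.index? risk_order t).getD 0 else risk_order.length

def apply_mutex_alt (tags : List String) (group : List String) (risk_order : List String) : List String :=
  let present := tags.filter (fun t => group.contains t)
  if present.length ≤ 1 then tags
  else
    let keep := (PySem.List.min? present (pvRank risk_order)).getD ""   -- min(present, key=…); present ≠ []
    tags.filter (fun t => !group.contains t) ++ [keep]

-- ===== PRECONDITION & SPEC =====
def Spec_apply_mutex (tags : List String) (group : List String) (risk_order : List String) (out : List String) : Prop := out = apply_mutex_alt tags group risk_order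
instance (tags : List String) (group : List String) (risk_order : List String) (out : List String) : Decidable (Spec_apply_mutex tags group risk_order out) := by unfold Spec_apply_mutex; infer_instance

-- ===== CLAIM (what is proved, stated in full; the proofs are below) =====
def Claim_equal_apply_mutex : Prop := ∀ (tags : List String) (group : List String) (risk_order : List String), Dom_apply_mutex tags group risk_order → Spec_apply_mutex tags group risk_order (apply_mutex tags group risk_order)

-- ===== LEMMAS AND PROOFS =====

-- pvRank of an absent tag is the sentinel
theorem pvRank_of_not_mem {ro : List String} {t : String} (h : t ∉ ro) :
    pvRank ro t = ro.length := by
  simp [pvRank, h]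

-- pvRank of a member is its first index
theorem pvRank_of_mem {ro : List String} {t : String} (h : t ∈ ro) :
    ∃ hlt : pvRank ro t < ro.length,
      ro[pvRank ro t] = t ∧ ∀ j (_ : j < pvRank ro t) (hj' : j < ro.length), ro[j] ≠ t := by
  have hc : ro.contains t := by simpa using h
  obtain ⟨j, hj⟩ : ∃ j, PySem.List.index? ro t = some j := by
    have := (PySem.List.index?_isSome_iff (xs := ro) (v := t)).mpr h
    exact Option.isSome_iff_exists.mp this
  obtain ⟨hk, hget, hfirst⟩ := PySem.List.getElem_of_index?_eq_some hj
  have hr : pvRank ro t = j := by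
    unfold pvRank
    rw [if_pos hc, hj]
    rfl
  refine ⟨by omega, ?_, ?_⟩
  · simp [hr, hget]
  · intro i hi hi'
    have := hfirst i (by omega)
    simpa [hr] using this

-- Python min over a list whose tail never strictly improves on the head stays at the head
theorem min?_stay (K : String → Nat) (l : List String) :
    ∀ h : String, (∀ x ∈ l, ¬ K x < K h) → PySem.List.min? (h :: l) K = some h := by
  induction l with
  | nil =>
    intro h _
    simp [PySem.List.min?]
  | cons y ys ih =>
    intro h hall
    have hy : ¬ K y < K h := hall y List.mem_cons_self
    have step : PySem.List.min? (h :: y :: ys) K = PySem.List.min? (h :: ys) K := by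
      simp [PySem.List.min?, hy]
    rw [step]
    exact ih h (fun x hx => hall x (List.mem_cons_of_mem _ hx))

-- the heart: A's keep equals B's keep on a nonempty present list
theorem keep_eq (present ro : List String) (hp : present ≠ []) :
    (match ro.find? (fun r => present.contains r) with
     | some r => r
     | none => PySem.List.pyGetD present 0 "") =
    (PySem.List.min? present (pvRank ro)).getD "" := by
  cases hf : ro.find? (fun r => present.contains r) with
  | none =>
    have hnone : ∀ r ∈ ro, r ∉ present := by
      intro r hr
      have := List.find?_eq_none.mp hf r hr
      simpa using this
    have hkey : ∀ x ∈ present, pvRank ro x = ro.length := by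
      intro x hx
      exact pvRank_of_not_mem (fun hxro => hnone x hxro hx)
    obtain ⟨h, t, rfl⟩ := List.exists_cons_of_ne_nil hp
    rw [min?_stay (pvRank ro) t h ?_]
    · simp [PySem.List.pyGetD_zero_cons]
    · intro x hx
      have h1 := hkey x (List.mem_cons_of_mem _ hx)
      have h2 := hkey h List.mem_cons_self
      omega
  | some k =>
    obtain ⟨hpk, pre, post, hro, hpre⟩ := List.find?_eq_some_iff_append.mp hf
    subst hro
    have hkpres : k ∈ present := by simpa using hpk
    obtain ⟨m, hm⟩ : ∃ m, PySem.List.min? present (pvRank (pre ++ k :: post)) = some m := by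
      cases hmo : PySem.List.min? present (pvRank (pre ++ k :: post)) with
      | none => exact absurd ((PySem.List.min?_eq_none_iff _ _).mp hmo) hp
      | some m => exact ⟨m, rfl⟩
    have hmmem := PySem.List.min?_mem hm
    have hmin := PySem.List.min?_isMin hm
    have hkro : k ∈ pre ++ k :: post := List.mem_append_right _ List.mem_cons_self
    obtain ⟨hkl, hkget, hkfirst⟩ := pvRank_of_mem hkro
    have hprelen : pre.length < (pre ++ k :: post).length := by simp
    have hle : pvRank (pre ++ k :: post) k ≤ pre.length := by
      by_contra hgt'
      have hgt := Nat.lt_of_not_le hgt'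
      have hgetpre : (pre ++ k :: post)[pre.length]'hprelen = k := by
        rw [List.getElem_append_right (le_refl pre.length)]
        simp
      exact hkfirst pre.length hgt hprelen hgetpre
    have hKk_min : ∀ y ∈ present,
        pvRank (pre ++ k :: post) k ≤ pvRank (pre ++ k :: post) y := by
      intro y hy
      by_cases hyro : y ∈ pre ++ k :: post
      · obtain ⟨hyl, hyget, _⟩ := pvRank_of_mem hyro
        have hge : pre.length ≤ pvRank (pre ++ k :: post) y := by
          by_contra hlt'
          have hlt := Nat.lt_of_not_le hlt'
          have hEq : (pre ++ k :: post)[pvRank (pre ++ k :: post) y]'hyl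
              = pre[pvRank (pre ++ k :: post) y]'hlt := List.getElem_append_left hlt
          have hpy : pre[pvRank (pre ++ k :: post) y]'hlt = y := hEq.symm.trans hyget
          have hnp : y ∉ present := by
            have := hpre _ (List.getElem_mem hlt)
            simpa [hpy] using this
          exact hnp hy
        omega
      · have := pvRank_of_not_mem hyro
        omega
    have heq : pvRank (pre ++ k :: post) m = pvRank (pre ++ k :: post) k :=
      le_antisymm (hmin k hkpres) (hKk_min m hmmem)
    have hmro : m ∈ pre ++ k :: post := by
      by_contra hmn
      have := pvRank_of_not_mem hmn
      omega
    obtain ⟨hml, hmget, _⟩ := pvRank_of_mem hmro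
    have a1 : (pre ++ k :: post)[pvRank (pre ++ k :: post) m]? = some m := by
      rw [List.getElem?_eq_getElem hml, hmget]
    have a2 : (pre ++ k :: post)[pvRank (pre ++ k :: post) k]? = some k := by
      rw [List.getElem?_eq_getElem hkl, hkget]
    rw [heq, a2] at a1
    rw [hm]
    simpa using a1

-- ===== VERDICT (by name: the statement is the Claim_ definition above) =====
theorem apply_mutex_spec : Claim_equal_apply_mutex := by
  intro tags group ro _
  unfold Spec_apply_mutex apply_mutex apply_mutex_alt
  dsimp only
  by_cases hle : (tags.filter (fun t => group.contains t)).length ≤ 1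
  · rw [if_pos hle, if_pos hle]
  · have hne : tags.filter (fun t => group.contains t) ≠ [] := by
      intro h
      rw [h] at hle
      simp at hle
    rw [if_neg hle, if_neg hle, keep_eq _ _ hne]
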